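-- pv_equiv track=rewrite | github.com/emilybache/Encryptor-Refactoring-Kata | python/encryptor.py | cryptWordWithCharsToReplace
-- ===== SOURCE A (Python) =====
-- def cryptWordWithCharsToReplace(word, chars_to_replace):
--     if " " in word:
--         raise ValueError()
--     result = list(word)
--     for i in range(len(word)):
--         for j in range(len(chars_to_replace)):
--             if chars_to_replace[j] == word[i]:
--                 char_value = ord(word[i])
--                 result[i] = chr( char_value + 2)
--     return "".join(result)
-- ===== SOURCE B (Python) =====
-- def cryptWordWithCharsToReplace(word, chars_to_replace):
--     if " " in word:
--         raise ValueError()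
--     # staged passes: one full rewrite of the string per replacement character,
--     # each pass keyed off the ORIGINAL word so stages cannot cascade
--     result = word
--     for c in chars_to_replace:
--         shifted = chr(ord(c) + 2)
--         result = "".join(shifted if o == c else r for o, r in zip(word, result))
--     return result
-- ===== Notes on version B (the rewrite author's own statement) =====
-- stated objective: alternative
-- what changed: Loop interchange: instead of A's per-position inner rescan of chars_to_replace, B makes one whole-string staged pass over word per character of chars_to_replace, rewriting an intermediate string keyed off the original word via zip (order of passes provably irrelevant).
import Mathlib
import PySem

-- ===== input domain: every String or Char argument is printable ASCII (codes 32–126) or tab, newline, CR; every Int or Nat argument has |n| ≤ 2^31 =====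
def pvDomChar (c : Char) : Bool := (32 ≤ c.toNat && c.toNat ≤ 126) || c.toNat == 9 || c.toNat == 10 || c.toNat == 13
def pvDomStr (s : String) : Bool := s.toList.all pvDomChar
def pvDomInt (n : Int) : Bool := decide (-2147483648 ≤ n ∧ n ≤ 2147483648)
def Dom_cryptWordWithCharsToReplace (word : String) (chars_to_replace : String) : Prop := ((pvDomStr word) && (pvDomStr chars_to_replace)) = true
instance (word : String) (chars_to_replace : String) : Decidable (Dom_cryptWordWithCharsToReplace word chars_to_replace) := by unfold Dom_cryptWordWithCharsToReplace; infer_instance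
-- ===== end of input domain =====

-- B interchanges the loops: one whole-string staged pass per character of chars_to_replace,
-- keyed off the original word, instead of A's per-position rescan of chars_to_replace (alternative, same cost).

-- ===== PORT A =====
-- result = list(word); for i in range(len(word)): for j in range(len(chars_to_replace)):
--   if chars_to_replace[j] == word[i]: result[i] = chr(ord(word[i]) + 2)
-- (the 'if " " in word: raise ValueError()' guard is excluded by Pre_ below)
def cryptWordWithCharsToReplace (word : String) (chars_to_replace : String) : String :=
  let w := word.toList
  let cs := chars_to_replace.toList
  let result :=
    (List.range w.length).foldl (fun res i =>
      cs.foldl (fun r cj =>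
        if cj == w.getD i ' ' then r.set i (Char.ofNat ((w.getD i ' ').toNat + 2)) else r) res) w
  String.mk result

-- ===== PORT B =====
-- result = word; for c in chars_to_replace:
--   result = "".join(chr(ord(c)+2) if o == c else r for o, r in zip(word, result))
def cryptWordWithCharsToReplace_alt (word : String) (chars_to_replace : String) : String :=
  let w := word.toList
  let result :=
    chars_to_replace.toList.foldl (fun res c =>
      (w.zip res).map (fun p => if p.1 = c then Char.ofNat (c.toNat + 2) else p.2)) w
  String.mk result

-- ===== PRECONDITION & SPEC =====
-- Pre_ excludes exactly the inputs on which A raises ValueError: a space in word.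
def Pre_cryptWordWithCharsToReplace (word : String) (chars_to_replace : String) : Prop :=
  ' ' ∉ word.toList
instance (word : String) (chars_to_replace : String) : Decidable (Pre_cryptWordWithCharsToReplace word chars_to_replace) := by unfold Pre_cryptWordWithCharsToReplace; infer_instance
def pvWitness_cryptWordWithCharsToReplace : String × String := ("abc", "bx")

def Spec_cryptWordWithCharsToReplace (word : String) (chars_to_replace : String) (out : String) : Prop := out = cryptWordWithCharsToReplace_alt word chars_to_replace
instance (word : String) (chars_to_replace : String) (out : String) : Decidable (Spec_cryptWordWithCharsToReplace word chars_to_replace out) := by unfold Spec_cryptWordWithCharsToReplace; infer_instance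

-- ===== CLAIM (what is proved, stated in full; the proofs are below) =====
def Claim_equal_cryptWordWithCharsToReplace : Prop := ∀ (word : String) (chars_to_replace : String), Dom_cryptWordWithCharsToReplace word chars_to_replace → Pre_cryptWordWithCharsToReplace word chars_to_replace → Spec_cryptWordWithCharsToReplace word chars_to_replace (cryptWordWithCharsToReplace word chars_to_replace)

-- ===== LEMMAS AND PROOFS =====

-- shorthand for the shifted character
def pvShift (c : Char) : Char := Char.ofNat (c.toNat + 2)

-- A's inner loop: set index i to the shift iff c occurs in cs
theorem inner_fold_eq (cs : List Char) (c : Char) (i : Nat) (res : List Char) :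
    cs.foldl (fun r cj => if cj == c then r.set i (pvShift c) else r) res
      = if c ∈ cs then res.set i (pvShift c) else res := by
  induction cs generalizing res with
  | nil => simp
  | cons cj cs ih =>
    simp only [List.foldl_cons, List.mem_cons]
    by_cases h : cj == c
    · have hc : c = cj := (beq_iff_eq.mp h).symm
      rw [if_pos h, ih]
      by_cases hm : c ∈ cs
      · simp [hc, List.set_set]
      · simp [hc]
    · have hne : ¬ c = cj := fun e => h (beq_iff_eq.mpr e.symm)
      rw [if_neg h, ih]
      simp [hne]

-- A's outer loop over range produces the pointwise map
theorem outer_fold_eq (cs : List Char) (w : List Char) :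
    (List.range w.length).foldl (fun res i =>
        if w.getD i ' ' ∈ cs then res.set i (pvShift (w.getD i ' ')) else res) w
      = w.map (fun c => if c ∈ cs then pvShift c else c) := by
  have key : ∀ n, n ≤ w.length →
      (List.range n).foldl (fun res i =>
          if w.getD i ' ' ∈ cs then res.set i (pvShift (w.getD i ' ')) else res) w
        = (w.take n).map (fun c => if c ∈ cs then pvShift c else c) ++ w.drop n := by
    intro n hn
    induction n with
    | zero => simp
    | succ n ih =>
      have hn' : n ≤ w.length := Nat.le_of_succ_le hn
      rw [List.range_succ, List.foldl_append, ih hn']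
      simp only [List.foldl_cons, List.foldl_nil]
      have hlt : n < w.length := hn
      have hget : w.getD n ' ' = w[n] := by
        simp [List.getD, List.getElem?_eq_getElem hlt]
      set f : Char → Char := fun c => if c ∈ cs then pvShift c else c with hf
      have hdrop : w.drop n = w[n] :: w.drop (n + 1) := List.drop_eq_getElem_cons hlt
      have hlen : ((w.take n).map f).length = n := by
        simp [List.length_take, Nat.min_eq_left hn']
      have hset : ∀ v : Char,
          ((w.take n).map f ++ w.drop n).set n v
            = (w.take n).map f ++ v :: w.drop (n + 1) := by
        intro v
        rw [List.set_append_right _ _ (by omega), hlen, Nat.sub_self, hdrop]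
        rfl
      have htake : w.take (n + 1) = w.take n ++ [w[n]] := List.take_succ_eq_append_getElem hlt
      rw [htake]
      simp only [List.map_append, List.map_cons, List.map_nil, List.append_assoc,
        List.singleton_append]
      rw [hget]
      by_cases hm : w[n] ∈ cs
      · rw [if_pos hm, hset]
        have hfv : f w[n] = pvShift w[n] := by simp [hf, hm]
        rw [hfv]
      · rw [if_neg hm, hdrop]
        have hfv : f w[n] = w[n] := by simp [hf, hm]
        rw [hfv]
  have := key w.length (Nat.le_refl _)
  simpa using this

-- one B stage on a state that is a pointwise image of the original word
theorem stage_eq (w : List Char) (g : Char → Char) (c : Char) :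
    (w.zip (w.map g)).map (fun p => if p.1 = c then Char.ofNat (c.toNat + 2) else p.2)
      = w.map (fun o => if o = c then pvShift o else g o) := by
  induction w with
  | nil => simp
  | cons o w ih =>
    simp only [List.map_cons, List.zip_cons_cons, ih]
    by_cases h : o = c
    · subst h; simp [pvShift]
    · simp [h]

-- B's fold over the replacement characters produces the same pointwise map
theorem b_fold_eq (cs w : List Char) (g : Char → Char) :
    cs.foldl (fun res c =>
        (w.zip res).map (fun p => if p.1 = c then Char.ofNat (c.toNat + 2) else p.2)) (w.map g)
      = w.map (fun o => if o ∈ cs then pvShift o else g o) := by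
  induction cs generalizing g with
  | nil => simp
  | cons c cs ih =>
    simp only [List.foldl_cons, stage_eq, ih, List.mem_cons]
    apply List.map_congr_left
    intro o _
    by_cases hc : o = c
    · simp [hc]
    · by_cases hm : o ∈ cs <;> simp [hc, hm]

-- ===== VERDICT (by name: the statement is the Claim_ definition above) =====
theorem cryptWordWithCharsToReplace_spec : Claim_equal_cryptWordWithCharsToReplace := by
  intro word chars_to_replace _ _
  show _ = _
  unfold cryptWordWithCharsToReplace cryptWordWithCharsToReplace_alt
  simp only []
  congr 1
  have hfun : (fun (res : List Char) (i : Nat) =>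
      chars_to_replace.toList.foldl (fun r cj =>
        if cj == word.toList.getD i ' '
        then r.set i (Char.ofNat ((word.toList.getD i ' ').toNat + 2)) else r) res)
    = (fun (res : List Char) (i : Nat) =>
        if word.toList.getD i ' ' ∈ chars_to_replace.toList
        then res.set i (pvShift (word.toList.getD i ' ')) else res) := by
    funext res i
    exact inner_fold_eq chars_to_replace.toList (word.toList.getD i ' ') i res
  rw [hfun, outer_fold_eq]
  have := b_fold_eq chars_to_replace.toList word.toList id
  simp only [List.map_id] at this
  rw [this]
  rfl
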